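-- pv_equiv track=rewrite | github.com/Elijah-Huang/Competitive-Programming | Problems/Usaco/Usaco Gateway/Chapter 2/Part 2/runaround numbers.py | isrunround
-- ===== SOURCE A (Python) =====
-- def isrunround(num):
--     num = str(num)
--     step = int(num[0])
--     curr = 0
--     touched = set([0])
--     for i in range(len(num)-1):
--         next_index = (curr + (step % len(num))) % len(num)
--         if next_index not in touched:
--             touched.add(next_index)
--         else:
--             return False
--         step = int(num[next_index])
--         curr = next_index
--     next_index = (curr + (step % len(num))) % len(num)
--     if next_index == 0:
--         return True
--     return False
-- ===== SOURCE B (Python) =====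
-- def isrunround(num):
--     # Graph characterization: build the jump map succ, then decide whether it is a
--     # permutation of the positions (sorted check) whose graph is connected
--     # (union-by-relabelling) -- no orbit walk at all.
--     s = str(num)
--     n = len(s)
--     succ = [(i + int(s[i])) % n for i in range(n)]
--     if sorted(succ) != list(range(n)):
--         return False
--     label = list(range(n))
--     for i in range(n):
--         a, b = label[i], label[succ[i]]
--         if a != b:
--             label = [a if x == b else x for x in label]
--     return len(set(label)) == 1
-- ===== Notes on version B (the rewrite author's own statement) =====
-- stated objective: alternative
-- what changed: B replaces A's orbit walk with a seen-set by a graph characterization: it builds the jump map succ, checks via sorting that succ is a permutation of the positions, and checks that the functional graph {i - succ[i]} is connected with a union-by-relabelling pass; no jump walk is performed at all.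
import Mathlib
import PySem

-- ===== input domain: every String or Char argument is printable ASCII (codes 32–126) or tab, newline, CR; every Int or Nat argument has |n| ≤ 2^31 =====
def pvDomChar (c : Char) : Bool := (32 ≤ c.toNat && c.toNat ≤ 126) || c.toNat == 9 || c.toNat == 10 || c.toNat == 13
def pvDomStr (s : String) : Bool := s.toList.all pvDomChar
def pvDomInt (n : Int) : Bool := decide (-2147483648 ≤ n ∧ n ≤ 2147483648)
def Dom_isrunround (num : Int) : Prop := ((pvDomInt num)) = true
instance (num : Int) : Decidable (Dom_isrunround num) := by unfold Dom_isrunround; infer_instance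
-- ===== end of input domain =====

-- B decides the runaround property by a graph characterization (jump map is a
-- permutation, checked by sorting, whose graph is connected, checked by
-- union-by-relabelling) instead of A's incremental orbit walk with a seen-set
-- (objective: alternative).


-- ===== PORT A =====
-- shared primitive: int(num[i]) — exact for an in-range index into an all-digit string
-- (guaranteed by Pre_isrunround: str(num) of a nonnegative int is all digits)
def pvDigit (s : List Char) (i : Int) : Int :=
  (PySem.Int.ofChars? [PySem.List.pyGetD s i ' ']).getD 0

-- loop body of A: state = none once 'return False' fired, else (step, curr, touched)
def pvStepA (s : List Char) (st : Option (Int × Int × PySem.Set Int)) :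
    Option (Int × Int × PySem.Set Int) :=
  match st with
  | none => none
  | some (step, curr, touched) =>
    let next := PySem.Int.mod (curr + PySem.Int.mod step (s.length : Int)) (s.length : Int)
    if !(PySem.Set.contains touched next) then
      some (pvDigit s next, next, PySem.Set.add touched next)
    else none

def isrunround (num : Int) : Bool :=
  let s := PySem.Int.toChars num                   -- num = str(num)
  let n : Int := s.length
  let res := (PySem.List.pyRange 0 (n - 1) 1).foldl (fun st _i => pvStepA s st)
    (some (pvDigit s 0, 0, PySem.Set.ofList [0]))  -- step, curr, touched
  match res with
  | none => false                                  -- the loop returned False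
  | some (step, curr, _touched) =>
      decide (PySem.Int.mod (curr + PySem.Int.mod step n) n = 0)

-- ===== PORT B =====
-- one merge step of the union-by-relabelling pass: lab is the label table, i the edge index
def pvStepU (succ : List Int) (lab : List Int) (i : Int) : List Int :=
  let a := PySem.List.pyGetD lab i 0
  let b := PySem.List.pyGetD lab (PySem.List.pyGetD succ i 0) 0
  if a ≠ b then lab.map (fun x => if x = b then a else x) else lab

def isrunround_alt (num : Int) : Bool :=
  let s := PySem.Int.toChars num                   -- s = str(num)
  let n : Int := s.length
  let succ := (PySem.List.pyRange 0 n 1).map (fun i => PySem.Int.mod (i + pvDigit s i) n)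
  if PySem.List.sorted succ (fun x => x) false ≠ PySem.List.pyRange 0 n 1 then false
  else
    let lab := (PySem.List.pyRange 0 n 1).foldl (pvStepU succ) (PySem.List.pyRange 0 n 1)
    decide (PySem.Set.len (PySem.Set.ofList lab) = 1)

-- ===== PRECONDITION & SPEC =====
-- Pre_ excludes exactly the negative inputs, on which the Python A raises ValueError
-- (int('-'), the first character of str(num)); B raises the same error there.
def Pre_isrunround (num : Int) : Prop := 0 ≤ num
instance (num : Int) : Decidable (Pre_isrunround num) := by unfold Pre_isrunround; infer_instance
def pvWitness_isrunround : Int := 81362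

def Spec_isrunround (num : Int) (out : Bool) : Prop := out = isrunround_alt num
instance (num : Int) (out : Bool) : Decidable (Spec_isrunround num out) := by unfold Spec_isrunround; infer_instance

-- ===== CLAIM (what is proved, stated in full; the proofs are below) =====
def Claim_equal_isrunround : Prop := ∀ (num : Int), Dom_isrunround num → Pre_isrunround num → Spec_isrunround num (isrunround num)

-- ===== LEMMAS AND PROOFS =====

-- str(num) is never empty
lemma pvToDigitsCore_len (b f n : Nat) (acc : List Char) :
    acc.length + 1 ≤ (Nat.toDigitsCore b (f + 1) n acc).length := by
  induction f generalizing n acc with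
  | zero => simp only [Nat.toDigitsCore]; split <;> simp
  | succ f ih =>
    rw [show f + 1 + 1 = (f + 1) + 1 from rfl]
    simp only [Nat.toDigitsCore]
    split
    · simp
    · exact le_trans (by simp) (ih (n / b) _)

lemma pvToChars_pos (num : Int) : 0 < (PySem.Int.toChars num).length := by
  unfold PySem.Int.toChars Nat.toDigits
  split
  · simp
  · have := pvToDigitsCore_len 10 num.toNat num.toNat []
    simpa using lt_of_lt_of_le (by omega) this

lemma pvFoldl_const {α β : Type} (g : α → α) (l : List β) (init : α) :
    l.foldl (fun st _ => g st) init = g^[l.length] init := by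
  induction l generalizing init with
  | nil => rfl
  | cons x xs ih => simp [List.foldl, ih, Function.iterate_succ_apply]

lemma pvModCollapse (c d n : Int) (hn : 0 < n) :
    PySem.Int.mod (c + PySem.Int.mod d n) n = PySem.Int.mod (c + d) n := by
  rw [PySem.Int.mod_eq_emod_of_pos hn, PySem.Int.mod_eq_emod_of_pos hn,
      PySem.Int.mod_eq_emod_of_pos hn, Int.add_emod, Int.emod_emod_of_dvd _ dvd_rfl,
      ← Int.add_emod]

-- the jump function and the orbit of 0 under it
def pvOrbF (s : List Char) (j : Int) : Int := PySem.Int.mod (j + pvDigit s j) (s.length : Int)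

def pvOrbit (s : List Char) : Nat → Int
  | 0 => 0
  | k + 1 => pvOrbF s (pvOrbit s k)

-- iterates of the jump function from an arbitrary start
def pvIt (s : List Char) : Nat → Int → Int
  | 0, x => x
  | k + 1, x => pvOrbF s (pvIt s k x)

def pvL (s : List Char) (k : Nat) : List Int := (List.range (k + 1)).map (pvOrbit s)

-- the successor table of B
def pvSucc (s : List Char) : List Int :=
  (PySem.List.pyRange 0 (s.length : Int) 1).map (fun i => PySem.Int.mod (i + pvDigit s i) (s.length : Int))

-- the label table of B after processing the first m edges
def pvLab (s : List Char) (m : Nat) : List Int :=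
  (PySem.List.pyRange 0 (m : Int) 1).foldl (pvStepU (pvSucc s))
    (PySem.List.pyRange 0 (s.length : Int) 1)

-- "x and y lie on a common orbit" — the connectivity relation of the jump graph
def pvR (s : List Char) (x y : Int) : Prop := ∃ a b : Nat, pvIt s a x = pvIt s b y

lemma pvL_succ (s : List Char) (k : Nat) :
    pvL s (k + 1) = pvL s k ++ [pvOrbit s (k + 1)] := by
  simp [pvL, List.range_succ]

lemma pvOrbit_bounds (s : List Char) (h : 0 < s.length) (k : Nat) :
    0 ≤ pvOrbit s k ∧ pvOrbit s k < (s.length : Int) := by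
  cases k with
  | zero => simpa [pvOrbit] using by exact_mod_cast h
  | succ k =>
    have hn : (0 : Int) < (s.length : Int) := by exact_mod_cast h
    exact ⟨PySem.Int.mod_nonneg _ hn, PySem.Int.mod_lt _ hn⟩

lemma pvNodup_concat {l : List Int} {x : Int} :
    (l ++ [x]).Nodup ↔ l.Nodup ∧ x ∉ l := by
  simp only [List.nodup_append, List.nodup_singleton, true_and]
  constructor
  · rintro ⟨h1, h2⟩
    exact ⟨h1, fun hx => h2 x hx x (by simp) rfl⟩
  · rintro ⟨h1, h2⟩
    refine ⟨h1, fun a ha b hb => ?_⟩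
    simp only [List.mem_singleton] at hb
    subst hb
    exact fun he => h2 (he ▸ ha)

lemma pvA_iter (s : List Char) (h : 0 < s.length) (k : Nat) :
    (pvStepA s)^[k] (some (pvDigit s 0, 0, PySem.Set.ofList [0])) =
      if (pvL s k).Nodup
      then some (pvDigit s (pvOrbit s k), pvOrbit s k, PySem.Set.ofList (pvL s k))
      else none := by
  have hn : (0 : Int) < (s.length : Int) := by exact_mod_cast h
  induction k with
  | zero => simp [pvL, pvOrbit]
  | succ k ih =>
    rw [Function.iterate_succ_apply', ih]
    by_cases hnd : (pvL s k).Nodup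
    · simp only [hnd, if_true]
      have hnext : PySem.Int.mod (pvOrbit s k + PySem.Int.mod (pvDigit s (pvOrbit s k)) (s.length : Int)) (s.length : Int)
          = pvOrbit s (k + 1) := by
        rw [pvModCollapse _ _ _ hn]; rfl
      by_cases hmem : pvOrbit s (k + 1) ∈ pvL s k
      · have : ¬ (pvL s (k + 1)).Nodup := by
          rw [pvL_succ, pvNodup_concat]; tauto
        simp only [this, if_false, pvStepA, hnext]
        have : PySem.Set.contains (PySem.Set.ofList (pvL s k)) (pvOrbit s (k + 1)) = true := by
          rw [PySem.Set.contains_iff, PySem.Set.mem_ofList]; exact hmem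
        simp [hmem]
      · have hmem' : pvOrbit s (k + 1) ∉ PySem.Set.ofList (pvL s k) := by
          rw [PySem.Set.mem_ofList]; exact hmem
        have hc : PySem.Set.contains (PySem.Set.ofList (pvL s k)) (pvOrbit s (k + 1)) = false := by
          rw [← Bool.not_eq_true, PySem.Set.contains_iff, PySem.Set.mem_ofList]; exact hmem
        have hnd' : (pvL s (k + 1)).Nodup := by rw [pvL_succ, pvNodup_concat]; exact ⟨hnd, hmem⟩
        simp only [hnd', if_true, pvStepA, hnext, hc, Bool.not_false, if_true]
        rw [← PySem.Set.ofList_append_singleton, ← pvL_succ]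
    · have : ¬ (pvL s (k + 1)).Nodup := by
        rw [pvL_succ, pvNodup_concat]; tauto
      simp [hnd, this, pvStepA]

-- A's result, characterized
lemma pvA_char (num : Int) :
    isrunround num =
      decide ((pvL (PySem.Int.toChars num) ((PySem.Int.toChars num).length - 1)).Nodup ∧
        pvOrbit (PySem.Int.toChars num) ((PySem.Int.toChars num).length) = 0) := by
  unfold isrunround
  have h := pvToChars_pos num
  set s := PySem.Int.toChars num with hs
  have hn : (0 : Int) < (s.length : Int) := by exact_mod_cast h
  simp only [pvFoldl_const, PySem.List.length_pyRange_one]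
  have h1 : ((s.length : Int) - 1 - 0).toNat = s.length - 1 := by omega
  rw [h1, pvA_iter s h (s.length - 1)]
  have horb : PySem.Int.mod (pvOrbit s (s.length - 1) + PySem.Int.mod (pvDigit s (pvOrbit s (s.length - 1))) (s.length : Int)) (s.length : Int)
      = pvOrbit s s.length := by
    rw [pvModCollapse _ _ _ hn]
    have h2 : pvOrbit s ((s.length - 1) + 1) = pvOrbit s s.length := by congr 1; omega
    rw [← h2]; rfl
  by_cases hnd : (pvL s (s.length - 1)).Nodup
  · simp only [hnd, if_true, horb, decide_eq_decide]
    tauto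
  · simp [hnd]

-- B's result, characterized
lemma pvB_char (num : Int) :
    isrunround_alt num =
      decide (PySem.List.sorted (pvSucc (PySem.Int.toChars num)) (fun x => x) false =
          PySem.List.pyRange 0 ((PySem.Int.toChars num).length : Int) 1 ∧
        PySem.Set.len (PySem.Set.ofList (pvLab (PySem.Int.toChars num) ((PySem.Int.toChars num).length))) = 1) := by
  unfold isrunround_alt
  set s := PySem.Int.toChars num with hs
  show (if PySem.List.sorted (pvSucc s) (fun x => x) false ≠ PySem.List.pyRange 0 (s.length : Int) 1 then false
    else decide (PySem.Set.len (PySem.Set.ofList (pvLab s s.length)) = 1)) = _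
  by_cases hsor : PySem.List.sorted (pvSucc s) (fun x => x) false = PySem.List.pyRange 0 (s.length : Int) 1
  · simp [hsor]
  · simp [hsor]

-- basic facts about iterates
lemma pvIt_add (s : List Char) (a b : Nat) (x : Int) :
    pvIt s (a + b) x = pvIt s a (pvIt s b x) := by
  induction a with
  | zero => simp [pvIt]
  | succ a ih => rw [Nat.succ_add]; simp only [pvIt, ih]

lemma pvOrbit_eq_pvIt (s : List Char) (k : Nat) : pvOrbit s k = pvIt s k 0 := by
  induction k with
  | zero => rfl
  | succ k ih => simp only [pvOrbit, pvIt, ih]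

lemma pvOrbF_bounds (s : List Char) (h : 0 < s.length) (x : Int) :
    0 ≤ pvOrbF s x ∧ pvOrbF s x < (s.length : Int) := by
  have hn : (0 : Int) < (s.length : Int) := by exact_mod_cast h
  exact ⟨PySem.Int.mod_nonneg _ hn, PySem.Int.mod_lt _ hn⟩

lemma pvIt_bounds (s : List Char) (h : 0 < s.length) (k : Nat) (x : Int)
    (hx : 0 ≤ x ∧ x < (s.length : Int)) :
    0 ≤ pvIt s k x ∧ pvIt s k x < (s.length : Int) := by
  cases k with
  | zero => exact hx
  | succ k => exact pvOrbF_bounds s h _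

lemma pvR_refl (s : List Char) (x : Int) : pvR s x x := ⟨0, 0, rfl⟩

lemma pvR_symm {s : List Char} {x y : Int} (hr : pvR s x y) : pvR s y x := by
  obtain ⟨a, b, hab⟩ := hr; exact ⟨b, a, hab.symm⟩

lemma pvR_trans {s : List Char} {x y z : Int} (h1 : pvR s x y) (h2 : pvR s y z) : pvR s x z := by
  obtain ⟨a, b, hab⟩ := h1
  obtain ⟨c, d, hcd⟩ := h2
  refine ⟨c + a, b + d, ?_⟩
  rw [pvIt_add, hab, ← pvIt_add, Nat.add_comm c b, pvIt_add, hcd, ← pvIt_add]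

lemma pvR_edge (s : List Char) (x : Int) : pvR s x (pvOrbF s x) := ⟨1, 0, rfl⟩

-- indexing plumbing
lemma pvGetD_pyRange (N i : Int) (h0 : 0 ≤ i) (h1 : i < N) :
    PySem.List.pyGetD (PySem.List.pyRange 0 N 1) i 0 = i := by
  rw [PySem.List.pyGetD_eq_getElem _ _ h0 (by rw [PySem.List.length_pyRange_one]; omega),
      PySem.List.getElem_pyRange_one]
  omega

lemma pvGetD_map (g : Int → Int) (l : List Int) (i : Int) (h0 : 0 ≤ i)
    (h1 : i < (l.length : Int)) :
    PySem.List.pyGetD (l.map g) i 0 = g (PySem.List.pyGetD l i 0) := by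
  rw [PySem.List.pyGetD_eq_getElem _ _ h0 (by simpa using h1),
      PySem.List.pyGetD_eq_getElem _ _ h0 h1, List.getElem_map]

lemma pvGetD_succ (s : List Char) (i : Int) (h0 : 0 ≤ i) (h1 : i < (s.length : Int)) :
    PySem.List.pyGetD (pvSucc s) i 0 = pvOrbF s i := by
  unfold pvSucc
  exact PySem.List.pyGetD_map_pyRange_of_nonneg _ _ _ _ h0 h1

lemma pvGetD_mem (l : List Int) (i : Int) (h0 : 0 ≤ i) (h1 : i < (l.length : Int)) :
    PySem.List.pyGetD l i 0 ∈ l := by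
  rw [PySem.List.pyGetD_eq_getElem _ _ h0 h1]
  exact List.getElem_mem _

-- label-table facts
lemma pvLab_zero (s : List Char) :
    pvLab s 0 = PySem.List.pyRange 0 (s.length : Int) 1 := by
  simp [pvLab, PySem.List.pyRange_one_eq_nil]

lemma pvLab_succ (s : List Char) (m : Nat) :
    pvLab s (m + 1) = pvStepU (pvSucc s) (pvLab s m) (m : Int) := by
  unfold pvLab
  have hcast : (((m + 1 : Nat)) : Int) = (m : Int) + 1 := by push_cast; ring
  rw [hcast, PySem.List.pyRange_one_succ_right (by positivity), List.foldl_append]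
  rfl

lemma pvLab_len (s : List Char) (m : Nat) : (pvLab s m).length = s.length := by
  induction m with
  | zero => rw [pvLab_zero, PySem.List.length_pyRange_one]; omega
  | succ m ih =>
    rw [pvLab_succ]
    show (if _ ≠ _ then List.map _ (pvLab s m) else pvLab s m).length = s.length
    split
    · simpa using ih
    · exact ih

-- one merge step, with the successor lookup resolved
lemma pvLab_succ' (s : List Char) (m : Nat) (hm : m < s.length) :
    pvLab s (m + 1) =
      (if PySem.List.pyGetD (pvLab s m) (m : Int) 0
          = PySem.List.pyGetD (pvLab s m) (pvOrbF s (m : Int)) 0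
       then pvLab s m
       else (pvLab s m).map (fun x =>
         if x = PySem.List.pyGetD (pvLab s m) (pvOrbF s (m : Int)) 0
         then PySem.List.pyGetD (pvLab s m) (m : Int) 0 else x)) := by
  rw [pvLab_succ]
  unfold pvStepU
  rw [pvGetD_succ s (m : Int) (by positivity) (by exact_mod_cast hm)]
  by_cases he : PySem.List.pyGetD (pvLab s m) (m : Int) 0
      = PySem.List.pyGetD (pvLab s m) (pvOrbF s (m : Int)) 0 <;>
    simp [he]

-- after processing the first m edges, each processed edge's endpoints share a label
lemma pvLab_edge (s : List Char) (h : 0 < s.length) :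
    ∀ m, m ≤ s.length → ∀ e : Int, 0 ≤ e → e < (m : Int) →
      PySem.List.pyGetD (pvLab s m) e 0 = PySem.List.pyGetD (pvLab s m) (pvOrbF s e) 0 := by
  intro m
  induction m with
  | zero => intro _ e h0 h1; omega
  | succ m ih =>
    intro hm e h0 h1
    have hm' : m < s.length := by omega
    have hlen : ((pvLab s m).length : Int) = (s.length : Int) := by rw [pvLab_len]
    have hfb := pvOrbF_bounds s h e
    rw [pvLab_succ' s m hm']
    split
    · rename_i hab
      by_cases he : e < (m : Int)
      · exact ih (by omega) e h0 he
      · have : e = (m : Int) := by omega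
        subst this; exact hab
    · rename_i hab
      have hbnd1 : e < ((pvLab s m).length : Int) := by omega
      have hbnd2 : pvOrbF s e < ((pvLab s m).length : Int) := by omega
      rw [pvGetD_map _ _ _ h0 hbnd1, pvGetD_map _ _ _ hfb.1 hbnd2]
      by_cases he : e < (m : Int)
      · rw [ih (by omega) e h0 he]
      · have : e = (m : Int) := by omega
        subst this
        rw [if_neg hab, if_pos rfl]

-- labels only identify positions lying on a common orbit
lemma pvLab_sound (s : List Char) (h : 0 < s.length) :
    ∀ m, m ≤ s.length → ∀ i j : Int,
      0 ≤ i → i < (s.length : Int) → 0 ≤ j → j < (s.length : Int) →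
      PySem.List.pyGetD (pvLab s m) i 0 = PySem.List.pyGetD (pvLab s m) j 0 → pvR s i j := by
  intro m
  induction m with
  | zero =>
    intro _ i j hi0 hi1 hj0 hj1 heq
    rw [pvLab_zero, pvGetD_pyRange _ _ hi0 hi1, pvGetD_pyRange _ _ hj0 hj1] at heq
    exact heq ▸ pvR_refl s i
  | succ m ih =>
    intro hm i j hi0 hi1 hj0 hj1 heq
    have hm' : m < s.length := by omega
    have hmI0 : (0 : Int) ≤ (m : Int) := by positivity
    have hmI1 : (m : Int) < (s.length : Int) := by exact_mod_cast hm'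
    have hlen : ((pvLab s m).length : Int) = (s.length : Int) := by rw [pvLab_len]
    have hfb := pvOrbF_bounds s h (m : Int)
    rw [pvLab_succ' s m hm'] at heq
    by_cases hab : PySem.List.pyGetD (pvLab s m) (m : Int) 0
        = PySem.List.pyGetD (pvLab s m) (pvOrbF s (m : Int)) 0
    · rw [if_pos hab] at heq
      exact ih (by omega) i j hi0 hi1 hj0 hj1 heq
    · rw [if_neg hab, pvGetD_map _ _ _ hi0 (by omega), pvGetD_map _ _ _ hj0 (by omega)] at heq
      set a := PySem.List.pyGetD (pvLab s m) (m : Int) 0 with ha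
      set b := PySem.List.pyGetD (pvLab s m) (pvOrbF s (m : Int)) 0 with hb
      set u := PySem.List.pyGetD (pvLab s m) i 0 with hu
      set v := PySem.List.pyGetD (pvLab s m) j 0 with hv
      by_cases huv : u = v
      · exact ih (by omega) i j hi0 hi1 hj0 hj1 huv
      · have hRm : pvR s (m : Int) (pvOrbF s (m : Int)) := pvR_edge s _
        by_cases hub : u = b
        · -- u = b, so v must be a
          rw [if_pos hub] at heq
          have hvb : v ≠ b := fun hh => huv (hub.trans hh.symm)
          rw [if_neg hvb] at heq
          -- heq : a = v
          have h1 : pvR s i (pvOrbF s (m : Int)) :=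
            ih (by omega) i _ hi0 hi1 hfb.1 hfb.2 (hu ▸ hub)
          have h2 : pvR s j (m : Int) :=
            ih (by omega) j _ hj0 hj1 hmI0 hmI1 (hv ▸ heq.symm)
          exact pvR_trans (pvR_trans h1 (pvR_symm hRm)) (pvR_symm h2)
        · rw [if_neg hub] at heq
          by_cases hvb : v = b
          · rw [if_pos hvb] at heq
            -- heq : u = a
            have h1 : pvR s i (m : Int) :=
              ih (by omega) i _ hi0 hi1 hmI0 hmI1 heq
            have h2 : pvR s j (pvOrbF s (m : Int)) :=
              ih (by omega) j _ hj0 hj1 hfb.1 hfb.2 (hv ▸ hvb)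
            exact pvR_trans (pvR_trans h1 hRm) (pvR_symm h2)
          · rw [if_neg hvb] at heq
            exact absurd heq huv

-- set(l) for a constant nonempty list
lemma pvSetOne (l : List Int) (c : Int) (hne : l ≠ []) (hall : ∀ x ∈ l, x = c) :
    PySem.Set.ofList l = [c] := by
  induction l using List.reverseRecOn with
  | nil => exact absurd rfl hne
  | append_singleton l x ih =>
    rw [PySem.Set.ofList_append_singleton]
    rcases List.eq_nil_or_concat l with hl | _
    · subst hl
      have : x = c := hall x (by simp)
      simp [this, PySem.Set.add, PySem.Set.ofList]
    · have hl : l ≠ [] := by rintro rfl; simp_all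
      rw [ih hl (fun y hy => hall y (by simp [hy]))]
      have hx : x = c := hall x (by simp)
      subst hx
      exact PySem.Set.add_of_mem (by simp)

lemma pvAllEq_of_len_one (l : List Int)
    (hlen : PySem.Set.len (PySem.Set.ofList l) = 1) :
    ∀ x ∈ l, ∀ y ∈ l, x = y := by
  have hl : (PySem.Set.ofList l).length = 1 := by
    unfold PySem.Set.len at hlen; omega
  obtain ⟨c, hc⟩ := List.length_eq_one_iff.mp hl
  intro x hx y hy
  have hx' : x ∈ PySem.Set.ofList l := (PySem.Set.mem_ofList l x).mpr hx
  have hy' : y ∈ PySem.Set.ofList l := (PySem.Set.mem_ofList l y).mpr hy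
  rw [hc] at hx' hy'
  simp only [List.mem_singleton] at hx' hy'
  rw [hx', hy']

lemma pvSucc_eq (s : List Char) :
    pvSucc s = (PySem.List.pyRange 0 (s.length : Int) 1).map (pvOrbF s) := rfl

-- cancellation of iterates under injectivity of the jump map
lemma pvIt_cancel (s : List Char) (h : 0 < s.length)
    (hinj : ∀ x y : Int, 0 ≤ x → x < (s.length : Int) → 0 ≤ y → y < (s.length : Int) →
      pvOrbF s x = pvOrbF s y → x = y)
    (k : Nat) (x y : Int) (hx : 0 ≤ x ∧ x < (s.length : Int)) (hy : 0 ≤ y ∧ y < (s.length : Int)) :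
    pvIt s k x = pvIt s k y → x = y := by
  induction k with
  | zero => exact fun hh => hh
  | succ k ih =>
    intro hh
    have hbx := pvIt_bounds s h k x hx
    have hby := pvIt_bounds s h k y hy
    exact ih (hinj _ _ hbx.1 hbx.2 hby.1 hby.2 hh)

lemma pvOrbit_cancel (s : List Char) (h : 0 < s.length)
    (hinj : ∀ x y : Int, 0 ≤ x → x < (s.length : Int) → 0 ≤ y → y < (s.length : Int) →
      pvOrbF s x = pvOrbF s y → x = y)
    (i d : Nat) (hid : pvOrbit s i = pvOrbit s (i + d)) : pvOrbit s d = 0 := by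
  have h0 : (0 : Int) ≤ 0 ∧ (0 : Int) < (s.length : Int) := ⟨le_refl _, by exact_mod_cast h⟩
  have hd := pvOrbit_bounds s h d
  have hkey : pvIt s i (pvOrbit s d) = pvIt s i 0 := by
    rw [pvOrbit_eq_pvIt s d, ← pvIt_add, ← pvOrbit_eq_pvIt, ← hid, pvOrbit_eq_pvIt]
  exact pvIt_cancel s h hinj i _ _ hd h0 hkey

lemma pvPeriod_exists (s : List Char) (h : 0 < s.length)
    (hinj : ∀ x y : Int, 0 ≤ x → x < (s.length : Int) → 0 ≤ y → y < (s.length : Int) →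
      pvOrbF s x = pvOrbF s y → x = y) :
    ∃ p, 0 < p ∧ pvOrbit s p = 0 := by
  have hmaps : Set.MapsTo (fun k => (pvOrbit s k).toNat)
      ↑(Finset.range (s.length + 1)) ↑(Finset.range s.length) := by
    intro k _
    have hb := pvOrbit_bounds s h k
    simp only [Finset.coe_range, Set.mem_Iio]
    omega
  obtain ⟨x, hx, y, hy, hxy, hfxy⟩ :=
    Finset.exists_ne_map_eq_of_card_lt_of_maps_to (by simp) hmaps
  simp only [Finset.mem_range] at hx hy
  have hbx := pvOrbit_bounds s h x
  have hby := pvOrbit_bounds s h y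
  have hfxy' : (pvOrbit s x).toNat = (pvOrbit s y).toNat := by simpa using hfxy
  have horb : pvOrbit s x = pvOrbit s y := by omega
  rcases Nat.lt_or_ge x y with hlt | hge
  · exact ⟨y - x, by omega,
      pvOrbit_cancel s h hinj x (y - x) (by rw [horb]; congr 1; omega)⟩
  · have hlt : y < x := by omega
    exact ⟨x - y, by omega,
      pvOrbit_cancel s h hinj y (x - y) (by rw [← horb]; congr 1; omega)⟩

lemma pvOrbit_add_period (s : List Char) (q t : Nat) (hq : pvOrbit s q = 0) :
    pvOrbit s (t + q) = pvOrbit s t := by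
  rw [pvOrbit_eq_pvIt s (t + q), pvIt_add, ← pvOrbit_eq_pvIt s q, hq, ← pvOrbit_eq_pvIt s t]

lemma pvOrbit_add_mul_period (s : List Char) (q a : Nat) (hq : pvOrbit s q = 0) :
    ∀ c, pvOrbit s (a + c * q) = pvOrbit s a := by
  intro c
  induction c with
  | zero => simp
  | succ c ih =>
    have : a + (c + 1) * q = (a + c * q) + q := by ring
    rw [this, pvOrbit_add_period s q _ hq, ih]

lemma pvOrbit_mod (s : List Char) (q : Nat) (hq0 : 0 < q) (hq : pvOrbit s q = 0) :
    ∀ t, pvOrbit s t = pvOrbit s (t % q) := by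
  intro t
  induction t using Nat.strong_induction_on with
  | _ t ih =>
    by_cases htq : t < q
    · rw [Nat.mod_eq_of_lt htq]
    · have h1 : (t - q) + q = t := by omega
      have h2 := pvOrbit_add_period s q (t - q) hq
      rw [h1] at h2
      rw [h2, ih (t - q) (by omega),
        show t % q = (t - q) % q from Nat.mod_eq_sub_mod (by omega)]

-- coverage of all positions from the nodup orbit prefix (pigeonhole)
lemma pvCov_of_nodup (s : List Char) (h : 0 < s.length)
    (hnd : (pvL s (s.length - 1)).Nodup) :
    ∀ j : Int, 0 ≤ j → j < (s.length : Int) → ∃ k, k < s.length ∧ pvOrbit s k = j := by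
  have hL : pvL s (s.length - 1) = (List.range s.length).map (pvOrbit s) := by
    unfold pvL; congr 2; omega
  rw [hL] at hnd
  have hinjOn := List.inj_on_of_nodup_map hnd
  have hinj' : Set.InjOn (fun k => (pvOrbit s k).toNat) ↑(Finset.range s.length) := by
    intro x hx y hy hxy
    simp only [Finset.coe_range, Set.mem_Iio] at hx hy
    have hbx := pvOrbit_bounds s h x
    have hby := pvOrbit_bounds s h y
    have hxy' : (pvOrbit s x).toNat = (pvOrbit s y).toNat := by simpa using hxy
    exact hinjOn (List.mem_range.mpr hx) (List.mem_range.mpr hy) (by omega)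
  have hsub : Finset.image (fun k => (pvOrbit s k).toNat) (Finset.range s.length)
      ⊆ Finset.range s.length := by
    intro x hx
    simp only [Finset.mem_image, Finset.mem_range] at hx ⊢
    obtain ⟨k, hk, rfl⟩ := hx
    have hb := pvOrbit_bounds s h k
    omega
  have hcard : (Finset.image (fun k => (pvOrbit s k).toNat) (Finset.range s.length)).card
      = s.length := by
    rw [Finset.card_image_of_injOn hinj', Finset.card_range]
  have heq : Finset.image (fun k => (pvOrbit s k).toNat) (Finset.range s.length)
      = Finset.range s.length :=
    Finset.eq_of_subset_of_card_le hsub (by rw [hcard, Finset.card_range])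
  intro j hj0 hj1
  have : j.toNat ∈ Finset.range s.length := by simp; omega
  rw [← heq] at this
  simp only [Finset.mem_image, Finset.mem_range] at this
  obtain ⟨k, hk, hkj⟩ := this
  have hb := pvOrbit_bounds s h k
  exact ⟨k, hk, by omega⟩

-- FORWARD: the orbit condition gives the permutation (sorted) check
lemma pvPerm_of_orbit (s : List Char) (h : 0 < s.length)
    (hnd : (pvL s (s.length - 1)).Nodup) (hret : pvOrbit s s.length = 0) :
    (PySem.List.pyRange 0 (s.length : Int) 1).Perm (pvSucc s) := by
  have hcov := pvCov_of_nodup s h hnd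
  have hL : pvL s (s.length - 1) = (List.range s.length).map (pvOrbit s) := by
    unfold pvL; congr 2; omega
  -- pvL ~ pyRange
  have hmem : ∀ x, x ∈ pvL s (s.length - 1) ↔ x ∈ PySem.List.pyRange 0 (s.length : Int) 1 := by
    intro x
    rw [hL, PySem.List.mem_pyRange_one]
    constructor
    · intro hx
      obtain ⟨k, _, rfl⟩ := List.mem_map.mp hx
      have hb := pvOrbit_bounds s h k
      exact ⟨hb.1, hb.2⟩
    · intro hx
      obtain ⟨k, hk, hkx⟩ := hcov x hx.1 hx.2
      exact List.mem_map.mpr ⟨k, List.mem_range.mpr hk, hkx⟩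
  have hpermL : (pvL s (s.length - 1)).Perm (PySem.List.pyRange 0 (s.length : Int) 1) :=
    (List.perm_ext_iff_of_nodup hnd (PySem.List.nodup_pyRange_one _ _)).mpr hmem
  -- map pvOrbF over pvL is a rotation of pvL
  have hmapL : (pvL s (s.length - 1)).map (pvOrbF s)
      = ((List.range (s.length - 1)).map (fun k => pvOrbit s (k + 1))) ++ [0] := by
    rw [hL, List.map_map]
    have hn : s.length = (s.length - 1) + 1 := by omega
    rw [hn, List.range_succ, List.map_append]
    simp only [List.map_singleton]
    have hlast : (pvOrbF s ∘ pvOrbit s) (s.length - 1) = 0 := by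
      show pvOrbit s ((s.length - 1) + 1) = 0
      rw [show (s.length - 1) + 1 = s.length from by omega]
      exact hret
    rw [hlast]
    rfl
  have hLsplit : pvL s (s.length - 1)
      = 0 :: (List.range (s.length - 1)).map (fun k => pvOrbit s (k + 1)) := by
    rw [hL]
    have hn : s.length = (s.length - 1) + 1 := by omega
    rw [hn, List.range_succ_eq_map, List.map_cons, List.map_map]
    rfl
  have hrot : ((pvL s (s.length - 1)).map (pvOrbF s)).Perm (pvL s (s.length - 1)) := by
    rw [hmapL, hLsplit]
    exact List.perm_append_singleton 0 _
  calc (PySem.List.pyRange 0 (s.length : Int) 1).Perm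
        ((PySem.List.pyRange 0 (s.length : Int) 1).map (pvOrbF s)) := by
        refine ((hpermL.symm.map (pvOrbF s)).trans hrot).trans hpermL |>.symm
    _ = pvSucc s := (pvSucc_eq s).symm

-- FORWARD: the orbit condition gives a single label class
lemma pvLen_of_orbit (s : List Char) (h : 0 < s.length)
    (hnd : (pvL s (s.length - 1)).Nodup) :
    PySem.Set.len (PySem.Set.ofList (pvLab s s.length)) = 1 := by
  have hcov := pvCov_of_nodup s h hnd
  have hlen : (pvLab s s.length).length = s.length := pvLab_len s _
  have hedge := pvLab_edge s h s.length (le_refl _)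
  have hchain : ∀ k, PySem.List.pyGetD (pvLab s s.length) (pvOrbit s k) 0
      = PySem.List.pyGetD (pvLab s s.length) 0 0 := by
    intro k
    induction k with
    | zero => rfl
    | succ k ih =>
      have hb := pvOrbit_bounds s h k
      rw [show pvOrbit s (k + 1) = pvOrbF s (pvOrbit s k) from rfl,
          ← hedge (pvOrbit s k) hb.1 (by exact_mod_cast hb.2), ih]
  have hall : ∀ x ∈ pvLab s s.length, x = PySem.List.pyGetD (pvLab s s.length) 0 0 := by
    intro x hx
    obtain ⟨idx, hidx, rfl⟩ := List.mem_iff_getElem.mp hx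
    have hidx' : idx < s.length := by omega
    obtain ⟨k, _, hk⟩ := hcov (idx : Int) (by positivity) (by exact_mod_cast hidx')
    have : PySem.List.pyGetD (pvLab s s.length) (idx : Int) 0 = (pvLab s s.length)[idx] := by
      rw [PySem.List.pyGetD_eq_getElem _ _ (by positivity) (by exact_mod_cast hidx)]
      simp
    rw [← this, ← hk, hchain k]
  have hne : pvLab s s.length ≠ [] := by
    intro hc
    rw [hc] at hlen
    simp at hlen
    omega
  rw [pvSetOne _ _ hne hall]
  rfl

-- BACKWARD: permutation + single label class give the orbit condition
lemma pvB_to_A (s : List Char) (h : 0 < s.length)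
    (hinj : ∀ x y : Int, 0 ≤ x → x < (s.length : Int) → 0 ≤ y → y < (s.length : Int) →
      pvOrbF s x = pvOrbF s y → x = y)
    (hcon : ∀ j : Int, 0 ≤ j → j < (s.length : Int) → pvR s 0 j) :
    (pvL s (s.length - 1)).Nodup ∧ pvOrbit s s.length = 0 := by
  have hex : ∃ q, 0 < q ∧ pvOrbit s q = 0 := pvPeriod_exists s h hinj
  set q := Nat.find hex with hqdef
  have hq0 : 0 < q := (Nat.find_spec hex).1
  have hqorb : pvOrbit s q = 0 := (Nat.find_spec hex).2
  have hdist : ∀ i j, i < j → j < q → pvOrbit s i ≠ pvOrbit s j := by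
    intro i j hij hjq heq
    have : pvOrbit s (j - i) = 0 :=
      pvOrbit_cancel s h hinj i (j - i) (by rw [heq]; congr 1; omega)
    exact Nat.find_min hex (by omega) ⟨by omega, this⟩
  have hcov : ∀ j : Int, 0 ≤ j → j < (s.length : Int) → ∃ t, t < q ∧ pvOrbit s t = j := by
    intro j hj0 hj1
    obtain ⟨a, b, hab⟩ := hcon j hj0 hj1
    rw [← pvOrbit_eq_pvIt] at hab
    have hble : b ≤ a + b * q := by nlinarith
    set t0 := a + b * q - b with ht0
    have horb1 : pvOrbit s (b + t0) = pvOrbit s a := by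
      rw [show b + t0 = a + b * q by omega, pvOrbit_add_mul_period s q a hqorb b]
    have horb2 : pvOrbit s (b + t0) = pvIt s b (pvOrbit s t0) := by
      rw [pvOrbit_eq_pvIt, pvIt_add, ← pvOrbit_eq_pvIt]
    have hcancel : pvOrbit s t0 = j := by
      have hb1 := pvOrbit_bounds s h t0
      apply pvIt_cancel s h hinj b _ _ hb1 ⟨hj0, hj1⟩
      rw [← horb2, horb1, hab]
    exact ⟨t0 % q, Nat.mod_lt _ hq0, by rw [← pvOrbit_mod s q hq0 hqorb, hcancel]⟩
  -- q ≤ n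
  have hqle : q ≤ s.length := by
    have hinj' : Set.InjOn (fun k => (pvOrbit s k).toNat) ↑(Finset.range q) := by
      intro x hx y hy hxy
      simp only [Finset.coe_range, Set.mem_Iio] at hx hy
      have hxy' : (pvOrbit s x).toNat = (pvOrbit s y).toNat := by simpa using hxy
      have hbx := pvOrbit_bounds s h x
      have hby := pvOrbit_bounds s h y
      by_contra hne
      rcases Nat.lt_or_ge x y with hlt | hge
      · exact hdist x y hlt hy (by omega)
      · exact hdist y x (by omega) hx (by omega)
    have := Finset.card_le_card_of_injOn (t := Finset.range s.length) (fun k => (pvOrbit s k).toNat)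
      (fun a _ => by
        have hb := pvOrbit_bounds s h a
        simp only [Finset.coe_range, Set.mem_Iio]
        show (pvOrbit s a).toNat < s.length
        omega) hinj'
    simpa using this
  -- n ≤ q
  have hnle : s.length ≤ q := by
    have hsub : Finset.range s.length ⊆
        Finset.image (fun u => (pvOrbit s u).toNat) (Finset.range q) := by
      intro j hj
      simp only [Finset.mem_range] at hj
      obtain ⟨t, ht, hto⟩ := hcov (j : Int) (by positivity) (by exact_mod_cast hj)
      simp only [Finset.mem_image, Finset.mem_range]
      exact ⟨t, ht, by omega⟩
    calc s.length = (Finset.range s.length).card := (Finset.card_range _).symm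
      _ ≤ (Finset.image (fun u => (pvOrbit s u).toNat) (Finset.range q)).card :=
          Finset.card_le_card hsub
      _ ≤ (Finset.range q).card := Finset.card_image_le
      _ = q := Finset.card_range _
  have hqn : q = s.length := by omega
  constructor
  · have hL : pvL s (s.length - 1) = (List.range s.length).map (pvOrbit s) := by
      unfold pvL; congr 2; omega
    rw [hL]
    apply List.Nodup.map_on _ (List.nodup_range)
    intro x hx y hy hxy
    simp only [List.mem_range] at hx hy
    by_contra hne
    rcases Nat.lt_or_ge x y with hlt | hge
    · exact hdist x y hlt (by omega) hxy
    · exact hdist y x (by omega) (by omega) hxy.symm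
  · rw [← hqn]; exact hqorb

-- the mathematical bridge: orbit condition ⟺ permutation + connectivity
lemma pvMain (s : List Char) (h : 0 < s.length) :
    ((pvL s (s.length - 1)).Nodup ∧ pvOrbit s s.length = 0) ↔
      (PySem.List.sorted (pvSucc s) (fun x => x) false = PySem.List.pyRange 0 (s.length : Int) 1 ∧
       PySem.Set.len (PySem.Set.ofList (pvLab s s.length)) = 1) := by
  constructor
  · rintro ⟨hnd, hret⟩
    refine ⟨?_, pvLen_of_orbit s h hnd⟩
    exact PySem.List.sorted_eq_of_perm_of_pairwise_lt _ _ _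
      (pvPerm_of_orbit s h hnd hret) (PySem.List.pairwise_lt_pyRange_one _ _)
  · rintro ⟨hsor, hlen⟩
    have hN0 : (0 : Int) < (s.length : Int) := by exact_mod_cast h
    have hperm : (PySem.List.pyRange 0 (s.length : Int) 1).Perm (pvSucc s) := by
      have hp := PySem.List.sorted_perm (pvSucc s) (fun x => x) false
      rw [hsor] at hp
      exact hp
    have hnd : (pvSucc s).Nodup :=
      hperm.nodup_iff.mp (PySem.List.nodup_pyRange_one _ _)
    have hinj : ∀ x y : Int, 0 ≤ x → x < (s.length : Int) → 0 ≤ y → y < (s.length : Int) →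
        pvOrbF s x = pvOrbF s y → x = y := by
      intro x y hx0 hx1 hy0 hy1 hf
      have hndm : ((PySem.List.pyRange 0 (s.length : Int) 1).map (pvOrbF s)).Nodup := by
        rw [← pvSucc_eq]; exact hnd
      exact List.inj_on_of_nodup_map hndm
        (PySem.List.mem_pyRange_one.mpr ⟨hx0, hx1⟩)
        (PySem.List.mem_pyRange_one.mpr ⟨hy0, hy1⟩) hf
    have hcon : ∀ j : Int, 0 ≤ j → j < (s.length : Int) → pvR s 0 j := by
      intro j hj0 hj1
      have hlablen : ((pvLab s s.length).length : Int) = (s.length : Int) := by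
        rw [pvLab_len]
      have hall := pvAllEq_of_len_one _ hlen
      exact pvLab_sound s h s.length (le_refl _) 0 j (le_refl 0) hN0 hj0 hj1
        (hall _ (pvGetD_mem _ 0 (le_refl 0) (by omega)) _ (pvGetD_mem _ j hj0 (by omega)))
    exact pvB_to_A s h hinj hcon

-- ===== VERDICT (by name: the statement is the Claim_ definition above) =====
theorem isrunround_spec : Claim_equal_isrunround := by
  intro num _hdom _hpre
  unfold Spec_isrunround
  rw [pvA_char, pvB_char, decide_eq_decide]
  exact pvMain _ (pvToChars_pos num)
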